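-- pv_equiv track=rewrite | github.com/chrinide/chemtools-webapp | chem/gjfwriter.py | parse_end_name
-- ===== SOURCE A (Python) =====
-- def parse_end_name(name):
--     xgroup = "ABCDEFGHIJKL"
--     rgroup = "abcdefghijkl"
--     aryl0 = "2389"
--     aryl2 = "4567"
--
--     parts = []
--     r = 0
--     # start with -1 to add 1 later for core
--     lastconnect = -1
--     state = "start"
--     for char in name:
--         if char not in xgroup + aryl0 + aryl2 + rgroup:
--             raise ValueError("Bad Substituent Name: %s" % char)
--
--     for i, char in enumerate(name):
--         if state == "aryl0":
--             if char not in xgroup + aryl0 + aryl2: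
--                 raise ValueError("no rgroups allowed")
--             else:
--                 parts.append((char, lastconnect))
--
--             if char in xgroup:
--                 state = "end"
--             elif char in aryl0:
--                 state = "aryl0"
--             elif char in aryl2:
--                 state = "aryl2"
--             lastconnect = len(parts) - 1
--
--         elif state == "aryl2":
--             if char not in rgroup:
--                 parts.append(("a", lastconnect))
--                 parts.append(("a", lastconnect))
--                 parts.append((char, lastconnect))
--                 if char in xgroup:
--                     state = "end"
--                 elif char in aryl0:
--                     state = "aryl0"
--                 elif char in aryl2:
--                     state = "aryl2"
--                 lastconnect = len(parts) - 1
--             else: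
--                 if r == 0:
--                     try:
--                         if name[i+1] in rgroup:
--                             parts.append((char, lastconnect))
--                             r += 1
--                         else:
--                             parts.append((char, lastconnect))
--                             parts.append((char, lastconnect))
--                             r += 2
--                             state = "start"
--                     except IndexError:
--                         parts.append((char, lastconnect))
--                         parts.append((char, lastconnect))
--                         r += 2
--                         state = "start"
--                 elif r == 1:
--                     parts.append((char, lastconnect))
--                     r += 1
--                     state = "start"
--                 else:
--                     raise ValueError("too many rgroup")
--         elif state == "start":
--             if char not in xgroup + aryl0 + aryl2:
--                 raise ValueError("no rgroups allowed")
--             else: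
--                 parts.append((char, lastconnect))
--                 r = 0
--
--             if char in xgroup:
--                 state = "end"
--             elif char in aryl0:
--                 state = "aryl0"
--             elif char in aryl2:
--                 state = "aryl2"
--             lastconnect = len(parts) - 1
--     if state == "aryl0":
--         pass
--     elif state != "end" and state != "start":
--         parts.append(("a", lastconnect))
--         parts.append(("a", lastconnect))
--     return parts
-- ===== SOURCE B (Python) =====
-- def parse_end_name(name):
--     xgroup = "ABCDEFGHIJKL"
--     rgroup = "abcdefghijkl"
--     aryl0 = "2389"
--     aryl2 = "4567"
--
--     for char in name:
--         if char not in xgroup + aryl0 + aryl2 + rgroup: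
--             raise ValueError("Bad Substituent Name: %s" % char)
--
--     parts = []
--     lastconnect = -1
--     i = 0
--     n = len(name)
--     while i < n:
--         char = name[i]
--         if char in rgroup:
--             raise ValueError("no rgroups allowed")
--         parts.append((char, lastconnect))
--         lastconnect = len(parts) - 1
--         i += 1
--         if char in xgroup:
--             break
--         if char in aryl2:
--             rs = []
--             while i < n and len(rs) < 2 and name[i] in rgroup:
--                 rs.append(name[i])
--                 i += 1
--             if len(rs) == 0:
--                 rs = ["a", "a"]
--             elif len(rs) == 1:
--                 rs = [rs[0], rs[0]]
--             for rchar in rs: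
--                 parts.append((rchar, lastconnect))
--     return parts
-- ===== Notes on version B (the rewrite author's own statement) =====
-- stated objective: simpler
-- what changed: A's four-string state machine with an r-counter, a peek at name[i+1] and end-of-loop padding is replaced by a single index while-loop that, after each aryl2 character, directly consumes up to two following rgroup characters and pads/duplicates them on the spot, with no state or r variables.
import Mathlib
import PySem

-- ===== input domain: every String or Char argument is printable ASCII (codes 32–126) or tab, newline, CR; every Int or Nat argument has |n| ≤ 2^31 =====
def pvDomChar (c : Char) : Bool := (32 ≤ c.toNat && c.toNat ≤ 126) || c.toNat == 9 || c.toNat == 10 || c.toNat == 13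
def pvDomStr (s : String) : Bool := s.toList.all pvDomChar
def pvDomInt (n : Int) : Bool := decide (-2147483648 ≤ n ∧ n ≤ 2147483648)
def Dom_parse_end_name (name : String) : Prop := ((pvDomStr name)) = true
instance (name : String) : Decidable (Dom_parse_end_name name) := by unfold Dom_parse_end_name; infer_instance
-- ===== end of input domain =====

-- B replaces A's state/r machine by an index-free scan with explicit ≤2-rgroup lookahead after each aryl2 char; objective: simpler (same cost).

-- ===== PORT A =====
def pvXg : List Char := ['A','B','C','D','E','F','G','H','I','J','K','L']
def pvRg : List Char := ['a','b','c','d','e','f','g','h','i','j','k','l']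
def pvA0 : List Char := ['2','3','8','9']
def pvA2 : List Char := ['4','5','6','7']
def pvAlpha : List Char := pvXg ++ pvA0 ++ pvA2 ++ pvRg

-- the second for-loop of A; Option = the ValueError raises; peek name[i+1] is pyGet? on the full char list
def pvGoA (nl : List Char) : List (Int × Char) → List (String × Int) → Int → Int → String →
    Option (List (String × Int) × Int × Int × String)
  | [], parts, r, last, st => some (parts, r, last, st)
  | (i, c) :: rest, parts, r, last, st =>
    if st = "aryl0" then
      if c ∉ pvXg ++ pvA0 ++ pvA2 then none
      else
        let parts' := parts ++ [(String.singleton c, last)]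
        let st' := if c ∈ pvXg then "end" else if c ∈ pvA0 then "aryl0"
                   else if c ∈ pvA2 then "aryl2" else st
        pvGoA nl rest parts' r ((parts'.length : Int) - 1) st'
    else if st = "aryl2" then
      if c ∉ pvRg then
        let parts' := parts ++ [("a", last), ("a", last), (String.singleton c, last)]
        let st' := if c ∈ pvXg then "end" else if c ∈ pvA0 then "aryl0"
                   else if c ∈ pvA2 then "aryl2" else st
        pvGoA nl rest parts' r ((parts'.length : Int) - 1) st'
      else
        if r = 0 then
          match PySem.List.pyGet? nl (i + 1) with
          | some d =>
            if d ∈ pvRg then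
              pvGoA nl rest (parts ++ [(String.singleton c, last)]) (r + 1) last st
            else
              pvGoA nl rest (parts ++ [(String.singleton c, last), (String.singleton c, last)]) (r + 2) last "start"
          | none =>
              pvGoA nl rest (parts ++ [(String.singleton c, last), (String.singleton c, last)]) (r + 2) last "start"
        else if r = 1 then
          pvGoA nl rest (parts ++ [(String.singleton c, last)]) (r + 1) last "start"
        else none
    else if st = "start" then
      if c ∉ pvXg ++ pvA0 ++ pvA2 then none
      else
        let parts' := parts ++ [(String.singleton c, last)]
        let st' := if c ∈ pvXg then "end" else if c ∈ pvA0 then "aryl0"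
                   else if c ∈ pvA2 then "aryl2" else st
        pvGoA nl rest parts' 0 ((parts'.length : Int) - 1) st'
    else pvGoA nl rest parts r last st

-- A's code after the loop (final padding)
def pvFinish (x : List (String × Int) × Int × Int × String) : List (String × Int) :=
  if x.2.2.2 = "aryl0" then x.1
  else if x.2.2.2 ≠ "end" ∧ x.2.2.2 ≠ "start" then x.1 ++ [("a", x.2.2.1), ("a", x.2.2.1)]
  else x.1

def parse_end_name (name : String) : List (String × Int) :=
  let nl := name.toList
  if ∀ c ∈ nl, c ∈ pvAlpha then
    match pvGoA nl (PySem.List.enumerate nl 0) [] 0 (-1) "start" with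
    | some x => pvFinish x
    | none => []
  else []

-- ===== PORT B =====
-- B's inner while: collect up to k leading rgroup chars, return them and the rest
def pvCollectR : Nat → List Char → List Char × List Char
  | _, [] => ([], [])
  | 0, l => ([], l)
  | k + 1, c :: rest =>
    if c ∈ pvRg then
      let p := pvCollectR k rest
      (c :: p.1, p.2)
    else ([], c :: rest)

theorem pvCollectR_snd_length_le : ∀ (k : Nat) (l : List Char), (pvCollectR k l).2.length ≤ l.length := by
  intro k
  induction k with
  | zero => intro l; cases l <;> simp [pvCollectR]
  | succ k ih =>
    intro l
    cases l with
    | nil => simp [pvCollectR]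
    | cons c rest =>
      by_cases h : c ∈ pvRg
      · simpa [pvCollectR, h] using Nat.le_succ_of_le (ih rest)
      · simp [pvCollectR, h]

def pvGoB : List Char → List (String × Int) → Int → Option (List (String × Int))
  | [], parts, _ => some parts
  | c :: rest, parts, last =>
    if c ∈ pvRg then none
    else
      let parts' := parts ++ [(String.singleton c, last)]
      let last' : Int := (parts'.length : Int) - 1
      if c ∈ pvXg then some parts'
      else if c ∈ pvA2 then
        let p := pvCollectR 2 rest
        let rs := if p.1.length = 0 then ['a', 'a']
                  else if p.1.length = 1 then [p.1.headI, p.1.headI] else p.1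
        pvGoB p.2 (parts' ++ rs.map (fun rc => (String.singleton rc, last'))) last'
      else
        pvGoB rest parts' last'
termination_by l _ _ => l.length
decreasing_by
  · exact Nat.lt_succ_of_le (pvCollectR_snd_length_le 2 rest)
  · simp

def parse_end_name_alt (name : String) : List (String × Int) :=
  let nl := name.toList
  if ∀ c ∈ nl, c ∈ pvAlpha then (pvGoB nl [] (-1)).getD [] else []

-- ===== PRECONDITION & SPEC =====
-- Pre_ = exactly the inputs where Python A returns (no ValueError): every char is in the
-- substituent alphabet, and, before the first xgroup char (after which A ignores input),
-- every rgroup char either directly follows an aryl2 char or is the second rgroup after one.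
def Pre_parse_end_name (name : String) : Prop :=
  (∀ i < name.toList.length, name.toList[i]! ∈ pvAlpha) ∧
  ∀ i < name.toList.length, name.toList[i]! ∈ pvRg →
    (∀ j < i, name.toList[j]! ∉ pvXg) →
    ((1 ≤ i ∧ name.toList[i-1]! ∈ pvA2) ∨
     (2 ≤ i ∧ name.toList[i-1]! ∈ pvRg ∧ name.toList[i-2]! ∈ pvA2))
instance (name : String) : Decidable (Pre_parse_end_name name) := by
  unfold Pre_parse_end_name
  exact instDecidableAnd (dp := Nat.decidableBallLT _ _) (dq := Nat.decidableBallLT _ _)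
def pvWitness_parse_end_name : String := "4ab2A"

def Spec_parse_end_name (name : String) (out : List (String × Int)) : Prop := out = parse_end_name_alt name
instance (name : String) (out : List (String × Int)) : Decidable (Spec_parse_end_name name out) := by unfold Spec_parse_end_name; infer_instance

-- ===== CLAIM (what is proved, stated in full; the proofs are below) =====
def Claim_equal_parse_end_name : Prop := ∀ (name : String), Dom_parse_end_name name → Pre_parse_end_name name → Spec_parse_end_name name (parse_end_name name)

-- ===== LEMMAS AND PROOFS =====


-- the four character classes are pairwise disjoint
theorem pvRg_disj : ∀ c ∈ pvRg, c ∉ pvXg ∧ c ∉ pvA0 ∧ c ∉ pvA2 := by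
  intro c hc; fin_cases hc <;> exact ⟨by decide, by decide, by decide⟩
theorem pvXg_disj : ∀ c ∈ pvXg, c ∉ pvRg ∧ c ∉ pvA0 ∧ c ∉ pvA2 := by
  intro c hc; fin_cases hc <;> exact ⟨by decide, by decide, by decide⟩
theorem pvA0_disj : ∀ c ∈ pvA0, c ∉ pvRg ∧ c ∉ pvXg ∧ c ∉ pvA2 := by
  intro c hc; fin_cases hc <;> exact ⟨by decide, by decide, by decide⟩
theorem pvA2_disj : ∀ c ∈ pvA2, c ∉ pvRg ∧ c ∉ pvXg ∧ c ∉ pvA0 := by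
  intro c hc; fin_cases hc <;> exact ⟨by decide, by decide, by decide⟩

-- in state "end" A's loop ignores the rest of the input
theorem pvEnd_skip (nl : List Char) :
    ∀ (e : List (Int × Char)) (parts : List (String × Int)) (r last : Int),
    pvGoA nl e parts r last "end" = some (parts, r, last, "end") := by
  intro e
  induction e with
  | nil => intro parts r last; simp [pvGoA]
  | cons p rest ih =>
    intro parts r last
    obtain ⟨i, c⟩ := p
    simpa [pvGoA] using ih parts r last

-- coherence of the enumerated list with a drop of the char list
theorem pvEnum_drop (nl : List Char) (i : Nat) (c : Char) (t : List Char)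
    (hs : nl.drop i = c :: t) :
    (PySem.List.enumerate nl 0).drop i = ((i : Int), c) :: (PySem.List.enumerate nl 0).drop (i + 1)
    ∧ nl.drop (i + 1) = t := by
  have hi : i < nl.length := by
    by_contra h
    rw [List.drop_eq_nil_iff.2 (by omega)] at hs
    exact List.cons_ne_nil c t hs.symm
  have hgc : nl[i] = c := by
    have := List.drop_eq_getElem_cons hi
    rw [hs] at this
    exact (List.cons.injEq _ _ _ _ ▸ this).1.symm
  have ht : nl.drop (i + 1) = t := by
    have := List.drop_eq_getElem_cons hi
    rw [hs] at this
    exact ((List.cons.injEq _ _ _ _ ▸ this).2).symm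
  refine ⟨?_, ht⟩
  have hi' : i < (PySem.List.enumerate nl 0).length := by
    rw [PySem.List.length_enumerate]; exact hi
  have := List.drop_eq_getElem_cons hi'
  rw [this, PySem.List.getElem_enumerate]
  simp [hgc]

theorem pvPeek (nl : List Char) (i : Nat) :
    PySem.List.pyGet? nl ((i : Int) + 1) = (nl.drop (i + 1)).head? := by
  have : ((i : Int) + 1) = ((i + 1 : Nat) : Int) := by push_cast; ring
  rw [this, PySem.List.pyGet?_natCast, List.head?_drop]

theorem pvSingleton_a : String.singleton 'a' = "a" := rfl

-- B's padding of the collected rgroup run (proof-side name for the rs computed in pvGoB)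
def pvPad (rs : List Char) : List Char :=
  if rs.length = 0 then ['a', 'a'] else if rs.length = 1 then [rs.headI, rs.headI] else rs

-- the continuation of pvGoB after an aryl2 char has been appended
def pvQrhs (s : List Char) (parts : List (String × Int)) (last : Int) : Option (List (String × Int)) :=
  pvGoB (pvCollectR 2 s).2
    (parts ++ (pvPad (pvCollectR 2 s).1).map (fun rc => (String.singleton rc, last))) last

theorem pvGoB_cons (c : Char) (rest : List Char) (parts : List (String × Int)) (last : Int) :
    pvGoB (c :: rest) parts last =
      (if c ∈ pvRg then none
       else if c ∈ pvXg then some (parts ++ [(String.singleton c, last)])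
       else if c ∈ pvA2 then
         pvQrhs rest (parts ++ [(String.singleton c, last)])
           (((parts ++ [(String.singleton c, last)]).length : Int) - 1)
       else pvGoB rest (parts ++ [(String.singleton c, last)])
              (((parts ++ [(String.singleton c, last)]).length : Int) - 1)) := by
  rw [pvGoB]
  split_ifs <;> simp_all [pvQrhs, pvPad]

theorem pvCollectR_zero : ∀ l : List Char, pvCollectR 0 l = ([], l) := by
  intro l; cases l <;> simp [pvCollectR]

theorem pvEnumDrop_nil (nl : List Char) (i : Nat) (h : nl.drop i = []) :
    (PySem.List.enumerate nl 0).drop i = [] := by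
  rw [List.drop_eq_nil_iff] at h ⊢
  rwa [PySem.List.length_enumerate]

theorem pvMain_nil (nl : List Char) (i : Nat) (hs : ([] : List Char) = nl.drop i)
    (parts : List (String × Int)) (last : Int) :
    ((∀ r, Option.map pvFinish (pvGoA nl ((PySem.List.enumerate nl 0).drop i) parts r last "start")
        = pvGoB ([] : List Char) parts last)
     ∧ (Option.map pvFinish (pvGoA nl ((PySem.List.enumerate nl 0).drop i) parts 0 last "aryl0")
        = pvGoB ([] : List Char) parts last)
     ∧ (Option.map pvFinish (pvGoA nl ((PySem.List.enumerate nl 0).drop i) parts 0 last "aryl2")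
        = pvQrhs ([] : List Char) parts last)) := by
  rw [pvEnumDrop_nil nl i hs.symm]
  refine ⟨fun r => ?_, ?_, ?_⟩ <;>
    simp [pvGoA, pvGoB, pvFinish, pvQrhs, pvCollectR, pvPad, pvSingleton_a]

theorem pvMain : ∀ (n : Nat) (nl s : List Char) (i : Nat), s = nl.drop i → s.length ≤ n →
    (∀ c ∈ s, c ∈ pvAlpha) → ∀ (parts : List (String × Int)) (last : Int),
    ((∀ r, Option.map pvFinish (pvGoA nl ((PySem.List.enumerate nl 0).drop i) parts r last "start")
        = pvGoB s parts last)
     ∧ (Option.map pvFinish (pvGoA nl ((PySem.List.enumerate nl 0).drop i) parts 0 last "aryl0")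
        = pvGoB s parts last)
     ∧ (Option.map pvFinish (pvGoA nl ((PySem.List.enumerate nl 0).drop i) parts 0 last "aryl2")
        = pvQrhs s parts last)) := by
  intro n
  induction n with
  | zero =>
    intro nl s i hs hlen _ parts last
    have hnil : s = [] := List.eq_nil_of_length_eq_zero (Nat.le_zero.mp hlen)
    subst hnil
    exact pvMain_nil nl i hs parts last
  | succ n ih =>
    intro nl s i hs hlen halpha parts last
    cases s with
    | nil => exact pvMain_nil nl i hs parts last
    | cons c t =>
      obtain ⟨henum, ht⟩ := pvEnum_drop nl i c t hs.symm
      have hcA : c ∈ pvAlpha := halpha c (List.mem_cons_self)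
      have htA : ∀ x ∈ t, x ∈ pvAlpha := fun x hx => halpha x (List.mem_cons_of_mem _ hx)
      have htlen : t.length ≤ n := by
        have : (c :: t).length ≤ n + 1 := hlen
        simpa using this
      have hclass : c ∈ pvXg ∨ c ∈ pvA0 ∨ c ∈ pvA2 ∨ c ∈ pvRg := by
        simpa [pvAlpha, or_assoc] using hcA
      refine ⟨fun r => ?_, ?_, ?_⟩
      · -- state "start"
        rw [henum]
        rcases hclass with hx | h0 | h2 | hr
        · obtain ⟨hnr, hn0, hn2⟩ := pvXg_disj c hx
          rw [pvGoB_cons]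
          simp [pvGoA, hx, hnr, hn0, hn2, pvEnd_skip, pvFinish]
        · obtain ⟨hnr, hnx, hn2⟩ := pvA0_disj c h0
          rw [pvGoB_cons]
          have hih := (ih nl t (i+1) ht.symm htlen htA
            (parts ++ [(String.singleton c, last)])
            (((parts ++ [(String.singleton c, last)]).length : Int) - 1)).2.1
          simp only [pvGoA]
          simpa [h0, hnr, hnx, hn2] using hih
        · obtain ⟨hnr, hnx, hn0⟩ := pvA2_disj c h2
          rw [pvGoB_cons]
          have hih := (ih nl t (i+1) ht.symm htlen htA
            (parts ++ [(String.singleton c, last)])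
            (((parts ++ [(String.singleton c, last)]).length : Int) - 1)).2.2
          simp only [pvGoA]
          simpa [h2, hnr, hnx, hn0] using hih
        · obtain ⟨hnx, hn0, hn2⟩ := pvRg_disj c hr
          rw [pvGoB_cons]
          simp [pvGoA, hr, hnx, hn0, hn2]
      · -- state "aryl0"
        rw [henum]
        rcases hclass with hx | h0 | h2 | hr
        · obtain ⟨hnr, hn0, hn2⟩ := pvXg_disj c hx
          rw [pvGoB_cons]
          simp [pvGoA, hx, hnr, hn0, hn2, pvEnd_skip, pvFinish]
        · obtain ⟨hnr, hnx, hn2⟩ := pvA0_disj c h0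
          rw [pvGoB_cons]
          have hih := (ih nl t (i+1) ht.symm htlen htA
            (parts ++ [(String.singleton c, last)])
            (((parts ++ [(String.singleton c, last)]).length : Int) - 1)).2.1
          simp only [pvGoA]
          simpa [h0, hnr, hnx, hn2] using hih
        · obtain ⟨hnr, hnx, hn0⟩ := pvA2_disj c h2
          rw [pvGoB_cons]
          have hih := (ih nl t (i+1) ht.symm htlen htA
            (parts ++ [(String.singleton c, last)])
            (((parts ++ [(String.singleton c, last)]).length : Int) - 1)).2.2
          simp only [pvGoA]
          simpa [h2, hnr, hnx, hn0] using hih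
        · obtain ⟨hnx, hn0, hn2⟩ := pvRg_disj c hr
          rw [pvGoB_cons]
          simp [pvGoA, hr, hnx, hn0, hn2]
      · -- state "aryl2"
        rw [henum]
        rcases hclass with hx | h0 | h2 | hr
        · -- non-rgroup: pad two 'a's, then xgroup char ends everything
          obtain ⟨hnr, hn0, hn2⟩ := pvXg_disj c hx
          have hcol : pvCollectR 2 (c :: t) = ([], c :: t) := by simp [pvCollectR, hnr]
          simp only [pvQrhs, hcol, pvPad]
          rw [pvGoB_cons]
          simp [pvGoA, hx, hnr, pvEnd_skip, pvFinish, pvSingleton_a]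
        · obtain ⟨hnr, hnx, hn2⟩ := pvA0_disj c h0
          have hih := (ih nl t (i+1) ht.symm htlen htA
            (parts ++ [("a", last), ("a", last), (String.singleton c, last)])
            (((parts ++ [("a", last), ("a", last), (String.singleton c, last)]).length : Int) - 1)).2.1
          have hcol : pvCollectR 2 (c :: t) = ([], c :: t) := by simp [pvCollectR, hnr]
          simp only [pvQrhs, hcol, pvPad]
          rw [pvGoB_cons]
          simp only [pvGoA]
          simpa [h0, hnr, hnx, hn2, pvSingleton_a] using hih
        · obtain ⟨hnr, hnx, hn0⟩ := pvA2_disj c h2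
          have hih := (ih nl t (i+1) ht.symm htlen htA
            (parts ++ [("a", last), ("a", last), (String.singleton c, last)])
            (((parts ++ [("a", last), ("a", last), (String.singleton c, last)]).length : Int) - 1)).2.2
          have hcol : pvCollectR 2 (c :: t) = ([], c :: t) := by simp [pvCollectR, hnr]
          conv_lhs => simp only [pvGoA]
          conv_rhs => simp only [pvQrhs, hcol, pvPad]
          rw [pvGoB_cons]
          simpa [h2, hnr, hnx, hn0, pvSingleton_a] using hih
        · -- rgroup after an aryl2 char: A peeks, B collects
          obtain ⟨hnx, hn0, hn2⟩ := pvRg_disj c hr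
          simp only [pvGoA]
          rw [pvPeek nl i, ht]
          cases t with
          | nil =>
            rw [pvEnumDrop_nil nl (i+1) ht]
            simp [pvGoA, pvQrhs, pvCollectR, pvPad, hr, pvFinish, pvGoB]
          | cons d t2 =>
            obtain ⟨henum2, ht2⟩ := pvEnum_drop nl (i+1) d t2 ht
            have ht2A : ∀ x ∈ t2, x ∈ pvAlpha := fun x hx => htA x (List.mem_cons_of_mem _ hx)
            by_cases hd : d ∈ pvRg
            · have hih := (ih nl t2 (i+2) ht2.symm
                (by have : (d :: t2).length ≤ n := htlen; simpa using Nat.le_of_succ_le this)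
                ht2A
                (parts ++ [(String.singleton c, last), (String.singleton d, last)]) last).1 2
              rw [henum2]
              simp only [pvQrhs, pvCollectR, pvPad, pvCollectR_zero]
              simp only [pvGoA]
              simpa [hr, hd, pvSingleton_a] using hih
            · have hih := (ih nl (d :: t2) (i+1) ht.symm htlen htA
                (parts ++ [(String.singleton c, last), (String.singleton c, last)]) last).1 2
              simp only [pvQrhs, pvCollectR, pvPad, pvCollectR_zero]
              simpa [hr, hd, pvSingleton_a] using hih

-- ===== VERDICT (by name: the statement is the Claim_ definition above) =====
theorem parse_end_name_spec : Claim_equal_parse_end_name := by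
  intro name _ _
  unfold Spec_parse_end_name parse_end_name parse_end_name_alt
  by_cases hA : ∀ c ∈ name.toList, c ∈ pvAlpha
  · simp only [if_pos hA]
    have h := (pvMain name.toList.length name.toList name.toList 0 (by simp) (by simp) hA [] (-1)).1 0
    rw [List.drop_zero] at h
    rw [← h]
    cases pvGoA name.toList (PySem.List.enumerate name.toList 0) [] 0 (-1) "start" <;> simp
  · simp [if_neg hA]
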